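-- pv_equiv track=rewrite | github.com/no-more-coffee/my-interview-questions | checkio/long-repeat-inside.py | repeat_inside
-- ===== SOURCE A (Python) =====
-- def repeat_inside(line):
--     """
--         first the longest repeating substring
--         Find a repeating sequence inside the substring.
--         I have an example for you: in a string "abababc" - "ab" is a sequence that repeats more than once,
--         so the answer will be "ababab"
--     """
--     line_len = len(line)
--     results = ['']
--     for sub_len in range(1, (line_len // 2) + 1):
--         for i in range(0, line_len - 2 * sub_len + 1):
--             target_str = line[i: i + sub_len]
--             tries = (line_len - i) // sub_len
--             matches = 0
--             for j in range(1, tries):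
--                 next_str = line[i + j * sub_len: i + (j + 1) * sub_len]
--                 if next_str != target_str:
--                     break
--                 matches += 1
--             if matches:
--                 results.append(target_str * (matches + 1))
--     return max(results, key=len)
-- ===== SOURCE B (Python) =====
-- def repeat_inside(line):
--     """
--         first the longest repeating substring
--         Find a repeating sequence inside the substring.
--         I have an example for you: in a string "abababc" - "ab" is a sequence that repeats more than once,
--         so the answer will be "ababab"
--     """
--     n = len(line)
--     best_len = 0
--     best_start = 0
--     for p in range(1, n // 2 + 1):
--         # runs[k] = length of the maximal run t with line[k+t] == line[k+p+t]
--         runs = [0] * (n - p + 1)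
--         for k in range(n - p - 1, -1, -1):
--             runs[k] = runs[k + 1] + 1 if line[k] == line[k + p] else 0
--         for i in range(0, n - 2 * p + 1):
--             m = runs[i] // p
--             if m:
--                 total = (m + 1) * p
--                 if total > best_len:
--                     best_len = total
--                     best_start = i
--     return line[best_start:best_start + best_len]
-- ===== Notes on version B (the rewrite author's own statement) =====
-- stated objective: faster
-- what changed: Replaces the cubic block-slice comparison (for each period and start, slice out successive blocks and compare them) with a per-period O(n) backward scan computing match-run lengths runs[k] via line[k]==line[k+p], from which the repeat count at each start is runs[i]//p.
import Mathlib
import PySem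

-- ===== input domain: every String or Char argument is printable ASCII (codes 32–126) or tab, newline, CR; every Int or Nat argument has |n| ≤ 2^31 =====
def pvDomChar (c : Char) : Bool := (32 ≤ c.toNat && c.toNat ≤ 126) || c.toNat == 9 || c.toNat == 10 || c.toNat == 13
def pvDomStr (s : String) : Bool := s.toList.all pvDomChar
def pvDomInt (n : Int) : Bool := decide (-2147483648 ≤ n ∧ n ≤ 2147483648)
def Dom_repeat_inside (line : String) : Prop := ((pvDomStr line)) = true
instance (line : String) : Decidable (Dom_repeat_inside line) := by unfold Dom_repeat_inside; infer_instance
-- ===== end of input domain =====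

-- B replaces A's cubic block-slice comparison with a per-period backward scan of
-- match-run lengths (runs[k] from line[k]==line[k+p]), an O(n^2) algorithm.

-- ===== PORT A =====
-- the inner 'for j in range(1, tries): … break' loop of A
def repeatInsideInner (s : List Char) (sub_len i : Int) (target_str : List Char) :
    Nat → Int → Int → Int
  | 0, _, matchesv => matchesv
  | fuel + 1, j, matchesv =>
    let next_str := PySem.List.slice s (some (i + j * sub_len)) (some (i + (j + 1) * sub_len))
    if next_str ≠ target_str then matchesv
    else repeatInsideInner s sub_len i target_str fuel (j + 1) (matchesv + 1)

def repeat_inside (line : String) : String :=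
  let s := line.toList
  let line_len : Int := (s.length : Int)
  let results : List (List Char) := [[]]
  let results := (PySem.List.pyRange 1 (PySem.Int.floordiv line_len 2 + 1) 1).foldl
    (fun results sub_len =>
      (PySem.List.pyRange 0 (line_len - 2 * sub_len + 1) 1).foldl
        (fun results i =>
          let target_str := PySem.List.slice s (some i) (some (i + sub_len))
          let tries := PySem.Int.floordiv (line_len - i) sub_len
          let matchesv := repeatInsideInner s sub_len i target_str (tries - 1).toNat 1 0
          if matchesv ≠ 0 then results ++ [PySem.List.pyRepeat target_str (matchesv + 1)]
          else results)
        results)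
    results
  String.ofList ((PySem.List.max? results (fun r => r.length)).getD [])

-- ===== PORT B =====
-- the backward fill 'runs[k] = runs[k+1] + 1 if line[k] == line[k+p] else 0';
-- altRuns s p m is the tail runs[n-p-m .. n-p] of the array (runs[n-p] = 0 sentinel)
def altRuns (s : List Char) (p : Nat) : Nat → List Nat
  | 0 => [0]
  | m + 1 =>
    let rest := altRuns s p m
    let k := s.length - p - (m + 1)
    (if s.getD k ' ' = s.getD (k + p) ' ' then rest.headD 0 + 1 else 0) :: rest

def repeat_inside_alt (line : String) : String :=
  let s := line.toList
  let n := s.length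
  let best := (List.range (n / 2)).foldl
    (fun (best : Nat × Nat) pm =>
      let p := pm + 1
      let runs := altRuns s p (n - p)
      (List.range (n - 2 * p + 1)).foldl
        (fun (best : Nat × Nat) i =>
          let m := runs.getD i 0 / p
          if m ≠ 0 then
            let total := (m + 1) * p
            if best.1 < total then (total, i) else best
          else best)
        best)
    (0, 0)
  String.ofList ((s.drop best.2).take best.1)

-- ===== PRECONDITION & SPEC =====
def Spec_repeat_inside (line : String) (out : String) : Prop := out = repeat_inside_alt line
instance (line : String) (out : String) : Decidable (Spec_repeat_inside line out) := by unfold Spec_repeat_inside; infer_instance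

-- ===== CLAIM (what is proved, stated in full; the proofs are below) =====
def Claim_equal_repeat_inside : Prop := ∀ (line : String), Dom_repeat_inside line → Spec_repeat_inside line (repeat_inside line)

-- ===== LEMMAS AND PROOFS =====

-- length of the maximal run t with s[i+t] == s[i+p+t]
def runLen (s : List Char) (p : Nat) (i : Nat) : Nat :=
  if h : i + p < s.length then
    if s.getD i ' ' = s.getD (i + p) ' ' then runLen s p (i + 1) + 1 else 0
  else 0
termination_by s.length - i
decreasing_by omega

-- repeat count minus one at (period p, start a)
def qv (s : List Char) (p a : Nat) : Nat := runLen s p a / p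
def blockT (s : List Char) (p a j : Nat) : List Char := (s.drop (a + j * p)).take p
def candL (s : List Char) (p a : Nat) : List Char := (s.drop a).take ((qv s p a + 1) * p)
-- the (period, start) pairs both programs record a candidate for, in traversal order
def pairsP (s : List Char) : List (Nat × Nat) :=
  (List.range (s.length / 2)).flatMap (fun k =>
    ((List.range (s.length - 2 * (k + 1) + 1)).filter
      (fun a => decide (qv s (k + 1) a ≠ 0))).map (fun a => (k + 1, a)))

lemma runLen_le (s : List Char) (p : Nat) : ∀ i, runLen s p i ≤ s.length - (i + p) := by
  intro i
  fun_induction runLen s p i with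
  | case1 i h heq ih => omega
  | case2 i h heq => omega
  | case3 i h => omega

lemma le_runLen_iff (s : List Char) (p : Nat) : ∀ (r : Nat) (i : Nat),
    (r ≤ runLen s p i ↔
      ∀ t < r, i + t + p < s.length ∧ s.getD (i + t) ' ' = s.getD (i + t + p) ' ') := by
  intro r
  induction r with
  | zero => intro i; simp
  | succ r ih =>
    intro i
    rw [runLen]
    split_ifs with h1 h2
    · constructor
      · intro hle t ht
        have hr : r ≤ runLen s p (i + 1) := by omega
        have hall := (ih (i + 1)).mp hr
        rcases Nat.eq_zero_or_pos t with ht0 | htp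
        · subst ht0; simpa using ⟨h1, h2⟩
        · obtain ⟨t', rfl⟩ : ∃ t', t = t' + 1 := ⟨t - 1, by omega⟩
          have := hall t' (by omega)
          have e1 : i + 1 + t' = i + (t' + 1) := by omega
          rw [e1] at this
          exact this
      · intro hall
        have := (ih (i + 1)).mpr (fun t ht => by
          have := hall (t + 1) (by omega)
          have e1 : i + (t + 1) = i + 1 + t := by omega
          rw [e1] at this
          exact ⟨by omega, this.2⟩)
        omega
    · constructor
      · intro h; omega
      · intro hall
        have := (hall 0 (by omega)).2
        simp at this
        exact absurd this h2
    · constructor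
      · intro h; omega
      · intro hall
        have := (hall 0 (by omega)).1
        omega
lemma take_drop_eq_iff (s : List Char) (p u v : Nat) (hu : u + p ≤ s.length)
    (hv : v + p ≤ s.length) :
    ((s.drop u).take p = (s.drop v).take p ↔
      ∀ t < p, s.getD (u + t) ' ' = s.getD (v + t) ' ') := by
  have lu : ((s.drop u).take p).length = p := by simp; omega
  have lv : ((s.drop v).take p).length = p := by simp; omega
  constructor
  · intro heq t ht
    have : ((s.drop u).take p)[t]'(by omega) = ((s.drop v).take p)[t]'(by omega) := by
      simp [heq]
    simp [List.getElem_take, List.getElem_drop] at this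
    rw [List.getD_eq_getElem s ' ' (by omega), List.getD_eq_getElem s ' ' (by omega)]
    exact this
  · intro hall
    apply List.ext_getElem (by omega)
    intro t h1 h2
    have ht : t < p := by omega
    have := hall t ht
    rw [List.getD_eq_getElem s ' ' (by omega), List.getD_eq_getElem s ' ' (by omega)] at this
    simpa [List.getElem_take, List.getElem_drop] using this


lemma blocks_iff (s : List Char) (p a : Nat) (hp : 1 ≤ p) : ∀ j, a + (j + 1) * p ≤ s.length →
    ((∀ j', 1 ≤ j' → j' ≤ j → blockT s p a j' = blockT s p a 0) ↔ j * p ≤ runLen s p a) := by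
  intro j
  induction j with
  | zero => intro _; simp; intro j' h1 h2; omega
  | succ j ih =>
    intro hb
    have hb' : a + (j + 1) * p ≤ s.length := by nlinarith
    constructor
    · intro h
      have hj : j * p ≤ runLen s p a := (ih hb').mp (fun j' h1 h2 => h j' h1 (by omega))
      rw [le_runLen_iff]
      intro t ht
      by_cases htj : t < j * p
      · exact (le_runLen_iff s p (j * p) a).mp hj t htj
      · obtain ⟨t', rfl⟩ : ∃ t', t = j * p + t' := ⟨t - j * p, by omega⟩
        have ht' : t' < p := by nlinarith
        have hbj : blockT s p a (j + 1) = blockT s p a j := by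
          rcases Nat.eq_zero_or_pos j with rfl | hj0
          · simpa using h 1 le_rfl le_rfl
          · rw [h (j + 1) (by omega) le_rfl, h j (by omega) (by omega)]
        unfold blockT at hbj
        have := (take_drop_eq_iff s p (a + (j + 1) * p) (a + j * p)
          (by nlinarith) (by nlinarith)).mp hbj t' ht'
        constructor
        · have : a + (j + 1) * p + t' ≤ a + (j + 1) * p + p := by omega
          nlinarith
        · have e1 : a + (j + 1) * p + t' = a + (j * p + t') + p := by ring
          have e2 : a + j * p + t' = a + (j * p + t') := by ring
          rw [e1, e2] at this
          exact this.symm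
    · intro h
      have hj : j * p ≤ runLen s p a := by nlinarith
      have hprev := (ih hb').mpr hj
      intro j' h1 h2
      rcases Nat.lt_succ_iff_lt_or_eq.mp (Nat.lt_succ_of_le h2) with h2' | rfl
      · exact hprev j' h1 (by omega)
      · have hbj : blockT s p a (j + 1) = blockT s p a j := by
          unfold blockT
          rw [take_drop_eq_iff s p _ _ (by nlinarith) (by nlinarith)]
          intro t ht
          have := (le_runLen_iff s p ((j + 1) * p) a).mp h (j * p + t) (by nlinarith)
          have e1 : a + (j + 1) * p + t = a + (j * p + t) + p := by ring
          have e2 : a + j * p + t = a + (j * p + t) := by ring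
          rw [e1, e2]
          exact this.2.symm
        rw [hbj]
        rcases Nat.eq_zero_or_pos j with rfl | hj0
        · rfl
        · exact hprev j (by omega) le_rfl

lemma altRuns_eq (s : List Char) (p : Nat) (hp : p ≤ s.length) :
    ∀ m, m ≤ s.length - p →
      altRuns s p m = (List.range (m + 1)).map (fun t => runLen s p (s.length - p - m + t)) := by
  intro m
  induction m with
  | zero =>
    intro _
    simp [altRuns]
    rw [runLen]
    have : ¬ (s.length - p + p < s.length) := by omega
    simp [this]
  | succ m ih =>
    intro hm
    have hrest := ih (by omega)
    show (if s.getD (s.length - p - (m + 1)) ' ' = s.getD (s.length - p - (m + 1) + p) ' '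
        then (altRuns s p m).headD 0 + 1 else 0) :: altRuns s p m = _
    rw [hrest]
    have hhead : ((List.range (m + 1)).map
        (fun t => runLen s p (s.length - p - m + t))).headD 0
        = runLen s p (s.length - p - m) := by
      rw [List.range_succ_eq_map]
      simp
    rw [hhead]
    have e0 : s.length - p - m = s.length - p - (m + 1) + 1 := by omega
    have hk : s.length - p - (m + 1) + p < s.length := by omega
    have hfirst : (if s.getD (s.length - p - (m + 1)) ' ' = s.getD (s.length - p - (m + 1) + p) ' '
        then runLen s p (s.length - p - m) + 1 else 0) = runLen s p (s.length - p - (m + 1)) := by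
      rw [e0]
      conv_rhs => rw [runLen]
      simp [hk]
    rw [hfirst]
    conv_rhs => rw [List.range_succ_eq_map]
    rw [List.map_cons, List.map_map]
    congr 1
    apply List.map_congr_left
    intro t _
    simp only [Function.comp_apply]
    congr 1
    omega

lemma altRuns_getD (s : List Char) (p i : Nat) (hp : p ≤ s.length) (hi : i ≤ s.length - p) :
    (altRuns s p (s.length - p)).getD i 0 = runLen s p i := by
  rw [altRuns_eq s p hp (s.length - p) le_rfl]
  rw [PySem.List.getD_map_range (h := by omega)]
  simp

lemma cand_len (s : List Char) (p a : Nat) (hp : 1 ≤ p) (ha : a + 2 * p ≤ s.length) :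
    a + (qv s p a + 1) * p ≤ s.length ∧ (candL s p a).length = (qv s p a + 1) * p := by
  have h1 : runLen s p a ≤ s.length - (a + p) := runLen_le s p a
  have h2 : qv s p a * p ≤ runLen s p a := Nat.div_mul_le_self _ _
  have hb : a + (qv s p a + 1) * p ≤ s.length := by
    have e : (qv s p a + 1) * p = qv s p a * p + p := by ring
    omega
  refine ⟨hb, ?_⟩
  simp [candL]
  omega

lemma cand_rep (s : List Char) (p a : Nat) (hp : 1 ≤ p) (ha : a + 2 * p ≤ s.length) :
    candL s p a = (List.replicate (qv s p a + 1) (blockT s p a 0)).flatten := by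
  have hb : a + (qv s p a + 1) * p ≤ s.length := (cand_len s p a hp ha).1
  have h2 : qv s p a * p ≤ runLen s p a := Nat.div_mul_le_self _ _
  have hblocks := (blocks_iff s p a hp (qv s p a) hb).mpr h2
  show (s.drop a).take ((qv s p a + 1) * p) = _
  have : ∀ m, m ≤ qv s p a → (s.drop a).take ((m + 1) * p)
      = (List.replicate (m + 1) (blockT s p a 0)).flatten := by
    intro m
    induction m with
    | zero => intro _; simp [blockT]
    | succ m ih =>
      intro hm
      have e1 : (m + 1 + 1) * p = (m + 1) * p + p := by ring
      rw [e1, List.take_add, ih (by omega)]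
      have e2 : (s.drop a).drop ((m + 1) * p) = s.drop (a + (m + 1) * p) := by
        rw [List.drop_drop]
      rw [e2]
      have hbm : blockT s p a (m + 1) = blockT s p a 0 := hblocks (m + 1) (by omega) (by omega)
      conv_rhs => rw [List.replicate_succ']
      rw [List.flatten_append]
      simp only [List.flatten_cons, List.flatten_nil, List.append_nil]
      rw [← hbm]
      rfl
  exact this (qv s p a) le_rfl

lemma qv_le (s : List Char) (p a : Nat) (hp : 1 ≤ p) (ha : a + 2 * p ≤ s.length) :
    qv s p a + 1 ≤ (s.length - a) / p := by
  have h1 : runLen s p a ≤ s.length - (a + p) := runLen_le s p a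
  have h2 : qv s p a ≤ (s.length - a - p) / p := by
    apply Nat.div_le_div_right
    omega
  have h3 : (s.length - a - p) / p + 1 = (s.length - a - p + p) / p :=
    (Nat.add_div_right _ (by omega)).symm
  have e : s.length - a - p + p = s.length - a := by omega
  rw [e] at h3
  omega

lemma inner_gen (s : List Char) (p a : Nat) (hp : 1 ≤ p) (ha : a + 2 * p ≤ s.length) :
    ∀ (fuel : Nat) (j : Nat) (mv : Int), 1 ≤ j → fuel + j = (s.length - a) / p →
      (∀ j', 1 ≤ j' → j' < j → blockT s p a j' = blockT s p a 0) →
      repeatInsideInner s (p : Int) (a : Int) (blockT s p a 0) fuel (j : Int) mv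
        = mv + ((qv s p a - (j - 1) : Nat) : Int) := by
  have hq := qv_le s p a hp ha
  intro fuel
  induction fuel with
  | zero =>
    intro j mv h1 hc hbl
    have : qv s p a - (j - 1) = 0 := by omega
    rw [this]
    simp [repeatInsideInner]
  | succ fuel ih =>
    intro j mv h1 hc hbl
    have hbound : a + (j + 1) * p ≤ s.length := by
      have h5 : (j + 1) * p ≤ ((s.length - a) / p) * p := by
        apply Nat.mul_le_mul_right
        omega
      have h6 : ((s.length - a) / p) * p ≤ s.length - a := Nat.div_mul_le_self _ _
      omega
    rw [repeatInsideInner]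
    have hs1 : (a : Int) + (j : Int) * (p : Int) = ((a + j * p : Nat) : Int) := by
      push_cast; ring
    have hs2 : (a : Int) + ((j : Int) + 1) * (p : Int) = ((a + j * p : Nat) : Int) + ((p : Nat) : Int) := by
      push_cast; ring
    rw [hs1, hs2, PySem.List.slice_natCast_add]
    have hblk : List.take p (List.drop (a + j * p) s) = blockT s p a j := rfl
    rw [hblk]
    by_cases hbj : blockT s p a j = blockT s p a 0
    · rw [if_neg (by simpa using hbj)]
      have hcast : ((j : Int) + 1) = ((j + 1 : Nat) : Int) := by push_cast; ring
      rw [hcast, ih (j + 1) (mv + 1) (by omega) (by omega) ?_]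
      · have hjq : j ≤ qv s p a := by
          have hbls : ∀ j', 1 ≤ j' → j' ≤ j → blockT s p a j' = blockT s p a 0 := by
            intro j' hj1 hj2
            rcases Nat.lt_or_ge j' j with h | h
            · exact hbl j' hj1 h
            · have : j' = j := by omega
              subst this; exact hbj
          have := (blocks_iff s p a hp j hbound).mp hbls
          exact Nat.le_div_iff_mul_le (by omega) |>.mpr this
        have e1 : qv s p a - (j + 1 - 1) + 1 = qv s p a - (j - 1) := by omega
        push_cast [← e1]
        ring
      · intro j' hj1 hj2
        rcases Nat.lt_or_ge j' j with h | h
        · exact hbl j' hj1 h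
        · have : j' = j := by omega
          subst this; exact hbj
    · rw [if_pos (by simpa using hbj)]
      have hjq : qv s p a ≤ j - 1 := by
        by_contra hcon
        have hjle : j ≤ qv s p a := by omega
        have hrun : j * p ≤ runLen s p a := by
          calc j * p ≤ qv s p a * p := Nat.mul_le_mul_right _ hjle
          _ ≤ runLen s p a := Nat.div_mul_le_self _ _
        have := (blocks_iff s p a hp j hbound).mpr hrun j h1 le_rfl
        exact hbj this
      have : qv s p a - (j - 1) = 0 := by omega
      rw [this]
      simp

lemma inner_eq (s : List Char) (p a : Nat) (hp : 1 ≤ p) (ha : a + 2 * p ≤ s.length) :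
    repeatInsideInner s (p : Int) (a : Int) (blockT s p a 0) ((s.length - a) / p - 1) 1 0
      = ((qv s p a : Nat) : Int) := by
  have hq := qv_le s p a hp ha
  have h2 : 2 * p ≤ s.length - a := by omega
  have hge : 2 ≤ (s.length - a) / p :=
    Nat.le_div_iff_mul_le (by omega) |>.mpr (by omega)
  have hone : ((1 : Nat) : Int) = (1 : Int) := by norm_num
  rw [← hone, inner_gen s p a hp ha _ 1 0 le_rfl (by omega) (by intro j' h1 h2'; omega)]
  simp
lemma max?_fold_aux (t : List (List Char)) : ∀ (c : List Char),
    List.foldl (fun acc x => match acc with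
        | none => some x
        | some m => if m.length < x.length then some x else some m)
      (some c) t
      = some (t.foldl (fun m x => if m.length < x.length then x else m) c) := by
  induction t with
  | nil => intro c; rfl
  | cons x t ih =>
    intro c
    simp only [List.foldl_cons]
    split_ifs with h <;> exact ih _

lemma max?_cons_fold (t : List (List Char)) (c : List Char) :
    PySem.List.max? (c :: t) (fun r => r.length)
      = some (t.foldl (fun m x => if m.length < x.length then x else m) c) := by
  unfold PySem.List.max?
  simp only [List.foldl_cons]
  convert max?_fold_aux t c using 2
  funext acc x
  rcases acc with _ | m
  · rfl
  · simp
def stepB (s : List Char) (best : Nat × Nat) (x : Nat × Nat) : Nat × Nat :=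
  if best.1 < (qv s x.1 x.2 + 1) * x.1 then ((qv s x.1 x.2 + 1) * x.1, x.2) else best

lemma sel (s : List Char) : ∀ (ps : List (Nat × Nat)) (c : List Char) (bl bs : Nat),
    c = (s.drop bs).take bl → c.length = bl →
    (∀ x ∈ ps, x.2 + (qv s x.1 x.2 + 1) * x.1 ≤ s.length) →
    ps.foldl (fun m x => if m.length < ((qv s x.1 x.2 + 1) * x.1) then candL s x.1 x.2 else m) c
      = (s.drop (ps.foldl (stepB s) (bl, bs)).2).take (ps.foldl (stepB s) (bl, bs)).1 := by
  intro ps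
  induction ps with
  | nil => intro c bl bs hc hl _; simpa using hc
  | cons x ps ih =>
    intro c bl bs hc hl hwf
    simp only [List.foldl_cons, stepB]
    rw [hl]
    by_cases hlt : bl < (qv s x.1 x.2 + 1) * x.1
    · rw [if_pos hlt, if_pos hlt]
      apply ih
      · rfl
      · have := hwf x (by simp)
        simp [candL]
        omega
      · intro y hy; exact hwf y (by simp [hy])
    · rw [if_neg hlt, if_neg hlt]
      apply ih _ _ _ hc hl
      intro y hy; exact hwf y (by simp [hy])

lemma pairsP_wf (s : List Char) : ∀ x ∈ pairsP s, 1 ≤ x.1 ∧ x.2 + 2 * x.1 ≤ s.length := by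
  intro x hx
  simp only [pairsP, List.mem_flatMap, List.mem_map, List.mem_filter, List.mem_range] at hx
  obtain ⟨k, hk, a, ⟨ha, -⟩, rfl⟩ := hx
  have : 2 * (k + 1) ≤ s.length := by
    have := Nat.div_mul_le_self s.length 2
    omega
  exact ⟨by omega, by omega⟩

lemma portB_eq (line : String) :
    repeat_inside_alt line =
      String.ofList
        ((line.toList.drop ((pairsP line.toList).foldl (stepB line.toList) (0, 0)).2).take
          ((pairsP line.toList).foldl (stepB line.toList) (0, 0)).1) := by
  unfold repeat_inside_alt
  dsimp only []
  have hfold :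
      List.foldl
        (fun best pm =>
          List.foldl
            (fun (best : Nat × Nat) i =>
              if (altRuns line.toList (pm + 1) (line.toList.length - (pm + 1))).getD i 0 / (pm + 1) ≠ 0 then
                if best.1 < ((altRuns line.toList (pm + 1) (line.toList.length - (pm + 1))).getD i 0 / (pm + 1) + 1) * (pm + 1) then
                  (((altRuns line.toList (pm + 1) (line.toList.length - (pm + 1))).getD i 0 / (pm + 1) + 1) * (pm + 1), i)
                else best
              else best)
            best (List.range (line.toList.length - 2 * (pm + 1) + 1)))
        ((0, 0) : Nat × Nat) (List.range (line.toList.length / 2))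
      = List.foldl (stepB line.toList) (0, 0) (pairsP line.toList) := by
    rw [pairsP, List.foldl_flatMap]
    apply PySem.List.foldl_congr_mem
    intro acc k hk
    rw [List.foldl_map]
    have hk' : k < line.toList.length / 2 := List.mem_range.mp hk
    have hbody : ∀ (b : Nat × Nat), ∀ i ∈ List.range (line.toList.length - 2 * (k + 1) + 1),
        (fun (best : Nat × Nat) i =>
          if (altRuns line.toList (k + 1) (line.toList.length - (k + 1))).getD i 0 / (k + 1) ≠ 0 then
            if best.1 < ((altRuns line.toList (k + 1) (line.toList.length - (k + 1))).getD i 0 / (k + 1) + 1) * (k + 1)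
            then (((altRuns line.toList (k + 1) (line.toList.length - (k + 1))).getD i 0 / (k + 1) + 1) * (k + 1), i)
            else best
          else best) b i
        = (fun (b : Nat × Nat) i => if qv line.toList (k + 1) i ≠ 0 then stepB line.toList b (k + 1, i) else b) b i := by
      intro b i hi
      have hi' : i < line.toList.length - 2 * (k + 1) + 1 := List.mem_range.mp hi
      have h2 : 2 * (k + 1) ≤ line.toList.length := by
        have := Nat.div_mul_le_self line.toList.length 2
        omega
      have hg : (altRuns line.toList (k + 1) (line.toList.length - (k + 1))).getD i 0
          = runLen line.toList (k + 1) i :=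
        altRuns_getD _ _ _ (by omega) (by omega)
      simp only [hg, stepB, qv]
    rw [PySem.List.foldl_congr_mem _ _ _ _ hbody]
    rw [PySem.List.foldl_ite_eq_foldl_filter]
  rw [hfold]

lemma bodyA_eq (s : List Char) (k a : Nat) (h2 : 2 * (k + 1) ≤ s.length)
    (ha : a ≤ s.length - 2 * (k + 1)) (res : List (List Char)) :
    (if repeatInsideInner s (↑(k + 1)) (↑a)
          (PySem.List.slice s (some ↑a) (some (↑a + ↑(k + 1))))
          (PySem.Int.floordiv (↑s.length - ↑a) (↑(k + 1)) - 1).toNat 1 0 ≠ 0 then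
        res ++ [PySem.List.pyRepeat (PySem.List.slice s (some ↑a) (some (↑a + ↑(k + 1))))
          (repeatInsideInner s (↑(k + 1)) (↑a)
            (PySem.List.slice s (some ↑a) (some (↑a + ↑(k + 1))))
            (PySem.Int.floordiv (↑s.length - ↑a) (↑(k + 1)) - 1).toNat 1 0 + 1)]
      else res)
    = if qv s (k + 1) a ≠ 0 then res ++ [candL s (k + 1) a] else res := by
  have ha2 : a + 2 * (k + 1) ≤ s.length := by omega
  have hsl : PySem.List.slice s (some ↑a) (some (↑a + ↑(k + 1))) = blockT s (k + 1) a 0 := by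
    rw [PySem.List.slice_natCast_add]
    simp [blockT]
  have e3 : (↑s.length - ↑a : Int) = ((s.length - a : Nat) : Int) := by omega
  have e4 : PySem.Int.floordiv (↑s.length - ↑a) (↑(k + 1) : Int)
      = ((((s.length - a) / (k + 1) : Nat)) : Int) := by
    rw [e3]
    exact_mod_cast PySem.Int.floordiv_natCast _ _
  have e5 : (((((s.length - a) / (k + 1) : Nat)) : Int) - 1).toNat
      = (s.length - a) / (k + 1) - 1 := by omega
  rw [hsl, e4, e5, inner_eq s (k + 1) a (by omega) ha2]
  by_cases hq : qv s (k + 1) a = 0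
  · simp [hq]
  · rw [if_pos (by exact_mod_cast hq), if_pos hq]
    have e6 : ((qv s (k + 1) a : Int) + 1).toNat = qv s (k + 1) a + 1 := by omega
    have : PySem.List.pyRepeat (blockT s (k + 1) a 0) ((qv s (k + 1) a : Int) + 1)
        = candL s (k + 1) a := by
      simp only [PySem.List.pyRepeat, e6]
      exact (cand_rep s (k + 1) a (by omega) ha2).symm
    rw [this]

lemma portA_eq (line : String) :
    repeat_inside line =
      String.ofList ((PySem.List.max?
        ([] :: (pairsP line.toList).map (fun x => candL line.toList x.1 x.2))
        (fun r => r.length)).getD []) := by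
  unfold repeat_inside
  dsimp only []
  have hrange1 : PySem.List.pyRange 1 (PySem.Int.floordiv (↑line.toList.length) 2 + 1) 1
      = (List.range (line.toList.length / 2)).map (fun k => (1 : Int) + ↑k) := by
    rw [show PySem.Int.floordiv (↑line.toList.length) 2 = ((line.toList.length / 2 : Nat) : Int) from by
      exact_mod_cast PySem.Int.floordiv_natCast line.toList.length 2]
    rw [PySem.List.pyRange_one]
    congr 1
    congr 1
    omega
  rw [hrange1, List.foldl_map]
  have houter : ∀ (res : List (List Char)), ∀ k ∈ List.range (line.toList.length / 2),
      (fun (results : List (List Char)) (sub_len : Int) =>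
        List.foldl
          (fun results i =>
            if repeatInsideInner line.toList sub_len i
                  (PySem.List.slice line.toList (some i) (some (i + sub_len)))
                  (PySem.Int.floordiv (↑line.toList.length - i) sub_len - 1).toNat 1 0 ≠ 0 then
              results ++
                [PySem.List.pyRepeat (PySem.List.slice line.toList (some i) (some (i + sub_len)))
                    (repeatInsideInner line.toList sub_len i
                        (PySem.List.slice line.toList (some i) (some (i + sub_len)))
                        (PySem.Int.floordiv (↑line.toList.length - i) sub_len - 1).toNat 1 0 + 1)]
            else results)
          results (PySem.List.pyRange 0 (↑line.toList.length - 2 * sub_len + 1))) res ((1 : Int) + ↑k)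
      = res ++ ((List.range (line.toList.length - 2 * (k + 1) + 1)).filter
          (fun a => decide (qv line.toList (k + 1) a ≠ 0))).map (fun a => candL line.toList (k + 1) a) := by
    intro res k hk
    have hk' : k < line.toList.length / 2 := List.mem_range.mp hk
    have h2 : 2 * (k + 1) ≤ line.toList.length := by
      have := Nat.div_mul_le_self line.toList.length 2
      omega
    have ek : ((1 : Int) + ↑k) = ((k + 1 : Nat) : Int) := by push_cast; ring
    dsimp only
    simp only [ek]
    have erange : (↑line.toList.length - 2 * ((k + 1 : Nat) : Int) + 1)
        = ((line.toList.length - 2 * (k + 1) + 1 : Nat) : Int) := by omega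
    rw [erange, PySem.List.pyRange_zero_natCast, List.foldl_map]
    refine Eq.trans (PySem.List.foldl_congr_mem _ _
        (fun (results : List (List Char)) (a : Nat) =>
          if qv line.toList (k + 1) a ≠ 0 then results ++ [candL line.toList (k + 1) a]
          else results) _
        (by
          intro acc a haa
          have ha' : a ≤ line.toList.length - 2 * (k + 1) := by
            have := List.mem_range.mp haa
            omega
          exact bodyA_eq line.toList k a h2 ha' acc)) ?_
    exact PySem.List.foldl_append_ite (fun a => qv line.toList (k + 1) a ≠ 0)
      (fun a => candL line.toList (k + 1) a) _ _
  have houter' := PySem.List.foldl_congr_mem _ _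
      (fun (res : List (List Char)) (k : Nat) =>
        res ++ ((List.range (line.toList.length - 2 * (k + 1) + 1)).filter
          (fun a => decide (qv line.toList (k + 1) a ≠ 0))).map
          (fun a => candL line.toList (k + 1) a))
      ([[]] : List (List Char)) houter
  rw [houter', PySem.List.foldl_append_eq_flatMap]
  congr 2
  rw [pairsP, List.map_flatMap, List.singleton_append]
  congr 1
  congr 1
  apply List.flatMap_congr
  intro k hk
  rw [List.map_map]
  rfl

-- ===== VERDICT (by name: the statement is the Claim_ definition above) =====
theorem repeat_inside_spec : Claim_equal_repeat_inside := by
  intro line _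
  unfold Spec_repeat_inside
  rw [portA_eq, portB_eq, max?_cons_fold]
  simp only [Option.getD_some]
  congr 1
  rw [List.foldl_map]
  refine Eq.trans (PySem.List.foldl_congr_mem _ _
      (fun (m : List Char) (x : Nat × Nat) =>
        if m.length < ((qv line.toList x.1 x.2 + 1) * x.1) then candL line.toList x.1 x.2 else m) _
      ?_) ?_
  · intro acc x hx
    have hwf := pairsP_wf line.toList x hx
    have hlen := (cand_len line.toList x.1 x.2 (by omega) (by omega)).2
    simp only [hlen]
  · apply sel line.toList (pairsP line.toList) [] 0 0 rfl rfl
    intro x hx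
    have hwf := pairsP_wf line.toList x hx
    exact (cand_len line.toList x.1 x.2 (by omega) (by omega)).1
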